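-- pv_equiv track=rewrite | github.com/n1cholasdunn/SRK-training | backend/gsheets/utils/fetchAndFormat/format_client_data.py | format_client_data
-- ===== SOURCE A (Python) =====
-- def format_client_data(data):
--     result = {}
--     for row in data:
--         key = None
--         for cell in row:
--             if not cell:
--                 continue
--             if key is None:
--                 key = cell
--             else:
--                 result[key] = cell
--                 key = None
--     return result
-- ===== SOURCE B (Python) =====
-- def format_client_data(data):
--     result = {}
--     for row in data:
--         cells = [c for c in row if c]
--         while len(cells) > 1:
--             result[cells[0]] = cells[1]
--             cells = cells[2:]
--     return result
-- ===== Notes on version B (the rewrite author's own statement) =====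
-- stated objective: simpler
-- what changed: Replaced A's key=None toggling state machine with a row-local filter of truthy cells followed by consuming the filtered list two at a time.
import Mathlib
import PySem

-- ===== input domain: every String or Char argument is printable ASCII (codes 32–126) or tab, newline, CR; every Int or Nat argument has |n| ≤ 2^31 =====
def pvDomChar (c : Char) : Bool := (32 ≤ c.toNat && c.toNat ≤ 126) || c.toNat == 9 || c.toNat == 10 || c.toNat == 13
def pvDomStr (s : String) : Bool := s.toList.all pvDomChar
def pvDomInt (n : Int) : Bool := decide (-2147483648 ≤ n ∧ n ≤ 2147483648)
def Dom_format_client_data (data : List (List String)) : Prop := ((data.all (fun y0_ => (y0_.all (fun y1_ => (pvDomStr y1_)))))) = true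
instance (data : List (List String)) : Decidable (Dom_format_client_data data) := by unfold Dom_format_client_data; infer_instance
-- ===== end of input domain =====

-- B replaces A's key=None toggling state machine with a row-local filter of the
-- truthy cells followed by consuming the filtered list two at a time (simpler
-- decomposition, same cost). The Python A returns a dict; per the type
-- convention both ports return its items in insertion order.

-- ===== PORT A =====
-- inner-loop body of A: state = (result dict, current pending key)
def fcdStepA (st : PySem.Dict String String × Option String) (cell : String) :
    PySem.Dict String String × Option String :=
  if cell = "" then st            -- 'if not cell: continue'
  else match st.2 with
    | none => (st.1, some cell)   -- 'if key is None: key = cell'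
    | some k => (st.1.insert k cell, none)  -- 'result[key] = cell; key = None'

def format_client_data (data : List (List String)) : List (String × String) :=
  (data.foldl (fun result row => (row.foldl fcdStepA (result, none)).1)
    PySem.Dict.empty).items

-- ===== PORT B =====
-- 'while len(cells) > 1: result[cells[0]] = cells[1]; cells = cells[2:]'
def fcdPairInsert (result : PySem.Dict String String) :
    List String → PySem.Dict String String
  | a :: b :: rest => fcdPairInsert (result.insert a b) rest
  | _ => result

def format_client_data_alt (data : List (List String)) : List (String × String) :=
  (data.foldl
    (fun result row => fcdPairInsert result (row.filter (fun c => !(c == ""))))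
    PySem.Dict.empty).items

-- ===== PRECONDITION & SPEC =====
def Spec_format_client_data (data : List (List String)) (out : List (String × String)) : Prop := out = format_client_data_alt data
instance (data : List (List String)) (out : List (String × String)) : Decidable (Spec_format_client_data data out) := by unfold Spec_format_client_data; infer_instance

-- ===== CLAIM (what is proved, stated in full; the proofs are below) =====
def Claim_equal_format_client_data : Prop := ∀ (data : List (List String)), Dom_format_client_data data → Spec_format_client_data data (format_client_data data)

-- ===== LEMMAS AND PROOFS =====

-- A's inner loop from state (d, ko) pairs up the pending key (if any) followed
-- by the truthy cells of the rest of the row.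
theorem fcd_row (row : List String) (d : PySem.Dict String String)
    (ko : Option String) :
    (row.foldl fcdStepA (d, ko)).1 =
      fcdPairInsert d (ko.toList ++ row.filter (fun c => !(c == ""))) := by
  induction row generalizing d ko with
  | nil =>
    cases ko <;> simp [fcdPairInsert]
  | cons c t ih =>
    by_cases hc : c = ""
    · subst hc
      cases ko <;> simp [List.foldl, fcdStepA, ih]
    · cases ko with
      | none =>
        simp [List.foldl, fcdStepA, hc, ih]
      | some k =>
        simp [List.foldl, fcdStepA, hc, ih, fcdPairInsert]

theorem fcd_folds_eq (data : List (List String)) (d : PySem.Dict String String) :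
    data.foldl (fun result row => (row.foldl fcdStepA (result, none)).1) d =
      data.foldl
        (fun result row => fcdPairInsert result (row.filter (fun c => !(c == "")))) d := by
  induction data generalizing d with
  | nil => rfl
  | cons r t ih =>
    simp only [List.foldl, fcd_row, Option.toList, List.nil_append]

-- ===== VERDICT (by name: the statement is the Claim_ definition above) =====
theorem format_client_data_spec : Claim_equal_format_client_data := by
  intro data _
  unfold Spec_format_client_data format_client_data format_client_data_alt
  rw [fcd_folds_eq]
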